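-- pv_equiv track=rewrite | github.com/I-am-PUID-0/DUMB | utils/traefik_setup.py | _select_traefik_asset
-- ===== SOURCE A (Python) =====
-- from typing import Any, Dict, List, Optional, Tuple
--
-- def _select_traefik_asset(
--     assets: List[Dict[str, Any]], arch_tag: Optional[str]
-- ) -> Optional[Dict[str, Any]]:
--     if not assets:
--         return None
--     if arch_tag:
--         for asset in assets:
--             name = asset.get("name", "").lower()
--             if arch_tag in name and name.endswith(".tar.gz"):
--                 return asset
--         for asset in assets:
--             name = asset.get("name", "").lower()
--             if arch_tag in name:
--                 return asset
--     return assets[0]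
-- ===== SOURCE B (Python) =====
-- from typing import Any, Dict, List, Optional
--
-- def _select_traefik_asset(
--     assets: List[Dict[str, Any]], arch_tag: Optional[str]
-- ) -> Optional[Dict[str, Any]]:
--     if not assets:
--         return None
--     if arch_tag:
--         fallback = None
--         for asset in assets:
--             name = asset.get("name", "").lower()
--             if arch_tag in name:
--                 if name.endswith(".tar.gz"):
--                     return asset
--                 if fallback is None:
--                     fallback = asset
--         if fallback is not None:
--             return fallback
--     return assets[0]
-- ===== Notes on version B (the rewrite author's own statement) =====
-- stated objective: alternative
-- what changed: Replaces A's two sequential scans over assets (first for a '.tar.gz' arch match, then for any arch match) by a single scan that returns the first '.tar.gz' arch match eagerly while keeping the earliest plain arch match in a fallback variable.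
import Mathlib
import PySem

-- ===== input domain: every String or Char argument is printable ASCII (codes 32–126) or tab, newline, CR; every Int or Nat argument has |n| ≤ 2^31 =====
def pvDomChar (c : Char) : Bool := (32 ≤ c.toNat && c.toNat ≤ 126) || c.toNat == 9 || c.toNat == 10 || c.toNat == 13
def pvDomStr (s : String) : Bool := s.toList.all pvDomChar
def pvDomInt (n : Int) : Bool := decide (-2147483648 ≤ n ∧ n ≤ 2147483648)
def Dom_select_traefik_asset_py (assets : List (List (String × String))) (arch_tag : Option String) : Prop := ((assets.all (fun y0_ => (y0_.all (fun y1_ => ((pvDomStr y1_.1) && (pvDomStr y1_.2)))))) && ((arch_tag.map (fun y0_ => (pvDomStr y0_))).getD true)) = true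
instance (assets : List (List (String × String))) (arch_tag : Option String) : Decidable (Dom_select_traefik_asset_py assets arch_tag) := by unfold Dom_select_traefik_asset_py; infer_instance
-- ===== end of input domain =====

-- B replaces A's two sequential scans over `assets` by one scan that returns the
-- first ".tar.gz" arch match eagerly and keeps the earliest plain arch match as a
-- fallback (objective: alternative decomposition, same cost).

-- shared helper: asset.get("name", "").lower()  (assoc-list first-match lookup)
def pvName (a : List (String × String)) : String :=
  PySem.Str.lower (((a.find? (fun kv => kv.1 == "name")).map Prod.snd).getD "")

-- ===== PORT A =====
def select_traefik_asset_py (assets : List (List (String × String))) (arch_tag : Option String) : Option (List (String × String)) :=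
  if assets = [] then none
  else
    match arch_tag with
    | some t =>
      if t ≠ "" then
        -- first loop: arch match that also ends with ".tar.gz"
        match assets.find? (fun a => PySem.Str.isIn t (pvName a) && PySem.Str.endswith (pvName a) ".tar.gz") with
        | some a => some a
        | none =>
          -- second loop: any arch match
          match assets.find? (fun a => PySem.Str.isIn t (pvName a)) with
          | some a => some a
          | none => PySem.List.pyGet? assets 0
      else PySem.List.pyGet? assets 0
    | none => PySem.List.pyGet? assets 0

-- ===== PORT B =====
-- B's single loop with a `fallback` accumulator
def pvScan (t : String) : List (List (String × String)) → Option (List (String × String)) → Option (List (String × String))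
  | [], fb => fb
  | a :: rest, fb =>
    let name := pvName a
    if PySem.Str.isIn t name then
      if PySem.Str.endswith name ".tar.gz" then some a
      else pvScan t rest (if fb.isNone then some a else fb)
    else pvScan t rest fb

def select_traefik_asset_py_alt (assets : List (List (String × String))) (arch_tag : Option String) : Option (List (String × String)) :=
  if assets = [] then none
  else
    match arch_tag with
    | some t =>
      if t ≠ "" then
        match pvScan t assets none with
        | some a => some a
        | none => PySem.List.pyGet? assets 0
      else PySem.List.pyGet? assets 0
    | none => PySem.List.pyGet? assets 0

-- ===== PRECONDITION & SPEC =====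
def Spec_select_traefik_asset_py (assets : List (List (String × String))) (arch_tag : Option String) (out : Option (List (String × String))) : Prop := out = select_traefik_asset_py_alt assets arch_tag
instance (assets : List (List (String × String))) (arch_tag : Option String) (out : Option (List (String × String))) : Decidable (Spec_select_traefik_asset_py assets arch_tag out) := by unfold Spec_select_traefik_asset_py; infer_instance

-- ===== CLAIM (what is proved, stated in full; the proofs are below) =====
def Claim_equal_select_traefik_asset_py : Prop := ∀ (assets : List (List (String × String))) (arch_tag : Option String), Dom_select_traefik_asset_py assets arch_tag → Spec_select_traefik_asset_py assets arch_tag (select_traefik_asset_py assets arch_tag)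

-- ===== LEMMAS AND PROOFS =====

-- the loop invariant: pvScan returns the first full match, else the fallback, else the first plain match
theorem pvScan_eq (t : String) (xs : List (List (String × String))) (fb : Option (List (String × String))) :
    pvScan t xs fb =
      match xs.find? (fun a => PySem.Str.isIn t (pvName a) && PySem.Str.endswith (pvName a) ".tar.gz") with
      | some a => some a
      | none =>
        match fb with
        | some f => some f
        | none => xs.find? (fun a => PySem.Str.isIn t (pvName a)) := by
  induction xs generalizing fb with
  | nil => cases fb <;> simp [pvScan]
  | cons a rest ih =>
    by_cases h1 : PySem.Chars.isIn t.toList (pvName a).toList = true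
    · by_cases h2 : PySem.Chars.endswith (pvName a).toList ['.', 't', 'a', 'r', '.', 'g', 'z'] = true
      · simp [pvScan, h1, h2]
      · cases fb <;> simp [pvScan, h1, h2, ih]
    · cases fb <;> simp [pvScan, h1, ih]

-- ===== VERDICT (by name: the statement is the Claim_ definition above) =====
theorem select_traefik_asset_py_spec : Claim_equal_select_traefik_asset_py := by
  intro assets arch_tag _
  unfold Spec_select_traefik_asset_py select_traefik_asset_py select_traefik_asset_py_alt
  by_cases he : assets = []
  · simp [he]
  · simp only [he, if_false]
    match arch_tag with
    | none => rfl
    | some t =>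
      by_cases ht : t = ""
      · simp [ht]
      · simp only [ht, ne_eq, not_false_eq_true, if_pos]
        rw [pvScan_eq]
        cases assets.find? (fun a => PySem.Str.isIn t (pvName a) && PySem.Str.endswith (pvName a) ".tar.gz") <;>
          cases assets.find? (fun a => PySem.Str.isIn t (pvName a)) <;> rfl
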